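-- pv_equiv track=rewrite | github.com/akhilsurnedi5479/2048 | game.py | isstopped
-- ===== SOURCE A (Python) =====
-- def isstopped(l):
--     i=0
--     j=0
--     while i<16:
--         j=0
--         while j<3:
--             if (l[i+j]==l[i+j+1]):
--                 return False
--             j+=1
--         i+=4
--     i=0
--     j=0
--     while i<4:
--         j=0
--         while j<3:
--             if l[i + j*4] == l[i +(j+1)*4]:
--                 return False
--             j+=1
--         i+=1
--     return True
-- ===== SOURCE B (Python) =====
-- def isstopped(l):
--     def smooth(line):
--         # recursively: no two adjacent entries of the line are equal
--         if len(line) < 2: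
--             return True
--         return line[0] != line[1] and smooth(line[1:])
--     return (all(smooth(l[4 * r:4 * r + 4]) for r in range(4))
--             and all(smooth([l[c + 4 * r] for r in range(4)]) for c in range(4)))
-- ===== Notes on version B (the rewrite author's own statement) =====
-- stated objective: alternative
-- what changed: B decomposes the board into its 4 row slices and 4 column lists and applies one recursive 'smooth' predicate (no equal adjacent entries, structural recursion on the line) to each, instead of A's four nested index-counting while-loops with early returns.
import Mathlib
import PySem

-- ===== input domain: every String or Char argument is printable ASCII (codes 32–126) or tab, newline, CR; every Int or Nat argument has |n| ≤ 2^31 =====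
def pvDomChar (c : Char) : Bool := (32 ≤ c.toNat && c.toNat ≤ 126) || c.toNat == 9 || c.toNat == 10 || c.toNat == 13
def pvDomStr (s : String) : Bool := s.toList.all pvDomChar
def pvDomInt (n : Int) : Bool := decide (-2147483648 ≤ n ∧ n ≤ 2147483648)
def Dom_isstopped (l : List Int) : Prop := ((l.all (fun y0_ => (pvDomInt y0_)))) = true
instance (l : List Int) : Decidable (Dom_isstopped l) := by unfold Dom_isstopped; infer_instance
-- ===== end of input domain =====

-- B decomposes the board into 4 row slices and 4 column lists and applies one recursive
-- 'smooth' predicate to each line, instead of A's four nested index-counting while-loops; no speed claim.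

-- ===== PORT A =====
-- inner 'while j<3' of the first phase: true iff some horizontal pair in row starting at i matches
def pvRowCheck (l : List Int) (i j : Nat) : Bool :=
  if j < 3 then
    (if PySem.List.pyGetD l ((i + j : Nat) : Int) 0 == PySem.List.pyGetD l ((i + j + 1 : Nat) : Int) 0 then true
     else pvRowCheck l i (j + 1))
  else false
termination_by 3 - j

-- inner 'while j<3' of the second phase: true iff some vertical pair in column i matches
def pvColCheck (l : List Int) (i j : Nat) : Bool :=
  if j < 3 then
    (if PySem.List.pyGetD l ((i + j * 4 : Nat) : Int) 0 == PySem.List.pyGetD l ((i + (j + 1) * 4 : Nat) : Int) 0 then true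
     else pvColCheck l i (j + 1))
  else false
termination_by 3 - j

-- second 'while i<4' loop
def pvPhase2 (l : List Int) (i : Nat) : Bool :=
  if i < 4 then
    (if pvColCheck l i 0 then false else pvPhase2 l (i + 1))
  else true
termination_by 4 - i

-- first 'while i<16' loop (falls through to phase 2)
def pvPhase1 (l : List Int) (i : Nat) : Bool :=
  if i < 16 then
    (if pvRowCheck l i 0 then false else pvPhase1 l (i + 4))
  else pvPhase2 l 0
termination_by 16 - i

def isstopped (l : List Int) : Bool := pvPhase1 l 0

-- ===== PORT B =====
-- smooth(line): no two adjacent entries equal, structural recursion on the line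
def pvSmooth : List Int → Bool
  | a :: b :: t => !(a == b) && pvSmooth (b :: t)
  | _ => true

-- all(smooth(l[4*r:4*r+4]) for r in range(4)) and all(smooth([l[c+4*r] for r in range(4)]) for c in range(4))
-- (l[c+4*r] raises IndexError in Python on a short board; pyGetD's default is only reached outside Pre_)
def isstopped_alt (l : List Int) : Bool :=
  ((PySem.List.pyRange 0 4 1).all (fun r =>
      pvSmooth (PySem.List.slice l (some (4 * r)) (some (4 * r + 4)))))
  && ((PySem.List.pyRange 0 4 1).all (fun c =>
      pvSmooth ((PySem.List.pyRange 0 4 1).map (fun r => PySem.List.pyGetD l (c + 4 * r) 0))))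

-- ===== PRECONDITION & SPEC =====
-- Exactly A's return domain: a full 16-cell board, or a shorter list on which the first scan
-- finds an adjacent equal pair (and returns False) before any out-of-range access.
def Pre_isstopped (l : List Int) : Prop :=
  16 ≤ l.length ∨ ∃ k : Nat, k < 15 ∧ k % 4 ≠ 3 ∧ k + 1 < l.length ∧ l.getD k 0 = l.getD (k + 1) 0
instance (l : List Int) : Decidable (Pre_isstopped l) := by unfold Pre_isstopped; infer_instance
def pvWitness_isstopped : List Int := [1,2,3,4,5,6,7,8,9,10,11,12,13,14,15,16]

def Spec_isstopped (l : List Int) (out : Bool) : Prop := out = isstopped_alt l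
instance (l : List Int) (out : Bool) : Decidable (Spec_isstopped l out) := by unfold Spec_isstopped; infer_instance

-- ===== CLAIM =====
def Claim_equal_isstopped : Prop := ∀ (l : List Int), Dom_isstopped l → Pre_isstopped l → Spec_isstopped l (isstopped l)

-- ===== LEMMAS AND PROOFS =====
theorem pvRange4 : PySem.List.pyRange 0 4 1 = [0,1,2,3] := by decide

theorem pvSlice_row (l : List Int) (a : Nat) :
    PySem.List.slice l (some (a : Int)) (some ((a : Int) + 4)) = (l.drop a).take 4 := by
  have h : ((a : Int) + 4) = ((a + 4 : Nat) : Int) := by push_cast; ring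
  rw [h, PySem.List.slice_natCast]
  congr 1
  omega

set_option maxRecDepth 10000 in
set_option maxHeartbeats 1000000 in
theorem isstopped_eq_on_16 (a0 a1 a2 a3 a4 a5 a6 a7 a8 a9 a10 a11 a12 a13 a14 a15 : Int) (t : List Int) :
    isstopped (a0::a1::a2::a3::a4::a5::a6::a7::a8::a9::a10::a11::a12::a13::a14::a15::t)
      = isstopped_alt (a0::a1::a2::a3::a4::a5::a6::a7::a8::a9::a10::a11::a12::a13::a14::a15::t) := by
  simp only [isstopped, isstopped_alt, pvRange4, List.all_cons, List.all_nil, List.map_cons, List.map_nil]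
  rw [show (4 * (0:Int)) = ((0:Nat):Int) by norm_num, show ((0:Nat):Int) + 4 = ((0:Nat):Int) + 4 by rfl]
  rw [pvSlice_row _ 0]
  rw [show (4 * (1:Int)) = ((4:Nat):Int) by norm_num, pvSlice_row _ 4]
  rw [show (4 * (2:Int)) = ((8:Nat):Int) by norm_num, pvSlice_row _ 8]
  rw [show (4 * (3:Int)) = ((12:Nat):Int) by norm_num, pvSlice_row _ 12]
  simp [pvPhase1, pvPhase2, pvRowCheck, pvColCheck, pvSmooth, PySem.List.pyGetD_ofNat']
  ac_rfl

theorem pvPhase1_unfold (l : List Int) :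
    pvPhase1 l 0 = (if pvRowCheck l 0 0 then false else if pvRowCheck l 4 0 then false
      else if pvRowCheck l 8 0 then false else if pvRowCheck l 12 0 then false else pvPhase2 l 0) := by
  rw [pvPhase1, pvPhase1, pvPhase1, pvPhase1, pvPhase1]
  norm_num

theorem pvRowCheck_true (l : List Int) (i j : Nat) (hj : j < 3)
    (he : PySem.List.pyGetD l ((i + j : Nat) : Int) 0 = PySem.List.pyGetD l ((i + j + 1 : Nat) : Int) 0) :
    pvRowCheck l i 0 = true := by
  rw [pvRowCheck, pvRowCheck, pvRowCheck, pvRowCheck]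
  interval_cases j <;> (push_cast at he ⊢; norm_num at he ⊢; tauto)

theorem pvPhase1_false (l : List Int)
    (h : pvRowCheck l 0 0 = true ∨ pvRowCheck l 4 0 = true ∨ pvRowCheck l 8 0 = true ∨ pvRowCheck l 12 0 = true) :
    pvPhase1 l 0 = false := by
  rw [pvPhase1_unfold]
  rcases h with h | h | h | h <;> simp [h]

theorem isstopped_short_A (l : List Int) (k : Nat) (hk : k < 15) (hm : k % 4 ≠ 3)
    (_hl : k + 1 < l.length) (he : l.getD k 0 = l.getD (k + 1) 0) :
    isstopped l = false := by
  have hj3 : k % 4 < 3 := by omega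
  have hrc : pvRowCheck l (4 * (k / 4)) 0 = true := by
    apply pvRowCheck_true l (4 * (k / 4)) (k % 4) hj3
    have h1 : 4 * (k / 4) + k % 4 = k := by omega
    rw [h1, PySem.List.pyGetD_natCast, PySem.List.pyGetD_natCast]
    exact he
  have hd : k / 4 = 0 ∨ k / 4 = 1 ∨ k / 4 = 2 ∨ k / 4 = 3 := by omega
  unfold isstopped
  apply pvPhase1_false
  rcases hd with h | h | h | h <;> rw [h] at hrc <;> norm_num at hrc <;> tauto

-- smooth is false on any line with an equal adjacent pair
theorem pvSmooth_false (line : List Int) (j : Nat) (hj : j + 1 < line.length)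
    (he : line.getD j 0 = line.getD (j + 1) 0) : pvSmooth line = false := by
  induction line generalizing j with
  | nil => simp at hj
  | cons a t ih =>
    cases t with
    | nil => simp at hj
    | cons b u =>
      cases j with
      | zero =>
        simp at he
        simp [pvSmooth, he]
      | succ j' =>
        have : pvSmooth (b :: u) = false := by
          apply ih j' (by simpa using hj)
          simpa using he
        simp [pvSmooth, this]

theorem isstopped_short_B (l : List Int) (k : Nat) (hk : k < 15) (hm : k % 4 ≠ 3)
    (hl : k + 1 < l.length) (he : l.getD k 0 = l.getD (k + 1) 0) :
    isstopped_alt l = false := by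
  have hj3 : k % 4 < 3 := by omega
  set r := k / 4 with hr
  have hk4 : 4 * r + k % 4 = k := by omega
  have hrow : pvSmooth ((l.drop (4 * r)).take 4) = false := by
    apply pvSmooth_false _ (k % 4)
    · simp [List.length_take, List.length_drop]
      omega
    · have g1 : ∀ m : Nat, m < 4 → 4 * r + m < l.length →
          ((l.drop (4 * r)).take 4).getD m 0 = l.getD (4 * r + m) 0 := by
        intro m hm4 hlen
        rw [List.getD_eq_getElem?_getD, List.getD_eq_getElem?_getD]
        rw [List.getElem?_take_of_lt hm4, List.getElem?_drop]
      rw [g1 _ (by omega) (by omega), g1 _ (by omega) (by omega)]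
      rw [hk4, show 4 * r + (k % 4 + 1) = k + 1 by omega]
      exact he
  have hd : r = 0 ∨ r = 1 ∨ r = 2 ∨ r = 3 := by omega
  unfold isstopped_alt
  rw [pvRange4]
  simp only [List.all_cons, List.all_nil]
  have hs : ∀ a : Nat, PySem.List.slice l (some ((4 : Int) * (a : Int))) (some ((4 : Int) * (a : Int) + 4)) = (l.drop (4*a)).take 4 := by
    intro a
    have h1 : (4 : Int) * (a : Int) = ((4 * a : Nat) : Int) := by push_cast; ring
    rw [h1, pvSlice_row]
  rcases hd with h | h | h | h <;> rw [h] at hrow <;> norm_num at hrow <;>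
    simp only [show ((0:Int)) = ((0:Nat):Int) by norm_num, show ((1:Int)) = ((1:Nat):Int) by norm_num,
      show ((2:Int)) = ((2:Nat):Int) by norm_num, show ((3:Int)) = ((3:Nat):Int) by norm_num, hs] <;>
    simp [hrow]

-- ===== VERDICT =====
theorem isstopped_spec : Claim_equal_isstopped := by
  intro l _ pre
  unfold Spec_isstopped
  by_cases h16 : 16 ≤ l.length
  case neg =>
    rcases pre with h | ⟨k, hk, hm, hl, he⟩
    · exact absurd h h16
    · rw [isstopped_short_A l k hk hm hl he, isstopped_short_B l k hk hm hl he]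
  rcases l with _|⟨a0,_|⟨a1,_|⟨a2,_|⟨a3,_|⟨a4,_|⟨a5,_|⟨a6,_|⟨a7,_|⟨a8,_|⟨a9,_|⟨a10,_|⟨a11,_|⟨a12,_|⟨a13,_|⟨a14,_|⟨a15,t⟩⟩⟩⟩⟩⟩⟩⟩⟩⟩⟩⟩⟩⟩⟩⟩
  all_goals first
      | (exact isstopped_eq_on_16 _ _ _ _ _ _ _ _ _ _ _ _ _ _ _ _ _)
      | (exfalso; simp at h16)
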